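-- pv_equiv track=rewrite | github.com/GiganticPlayground/amz-analytics | scripts/json_to_csv.py | get_field_order
-- ===== SOURCE A (Python) =====
-- from typing import List, Dict, Any, Set
--
-- def get_field_order(fields: Set[str]) -> List[str]:
--     """
--     Order fields for consistent CSV output.
--
--     Priority order:
--     1. Core fields (timestamp, sessionId, metricName, etc.)
--     2. Device fields
--     3. Attribute fields (attr_*)
--     4. Everything else
--
--     Args:
--         fields: Set of all field names
--
--     Returns:
--         Ordered list of field names
--     """
--     # Define priority order for core fields
--     core_fields = [
--         'timestamp', 'sessionId', 'metricName', 'value', 'demoContentId',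
--         'device', 'deviceCodename', 'language', 'connected', 'banyan',
--         'simplified', 'retailer', 'gitCommitSha', 'gitBranch',
--         'isVegaPlatform', 'userAgent', 'demoExperimentGroup'
--     ]
--
--     # Separate fields into categories
--     ordered = []
--     attr_fields = []
--     other_fields = []
--
--     for field in fields:
--         if field in core_fields:
--             continue  # Will add from core_fields list
--         elif field.startswith('attr_'):
--             attr_fields.append(field)
--         else:
--             other_fields.append(field)
--
--     # Build final order
--     for field in core_fields:
--         if field in fields:
--             ordered.append(field)
--
--     ordered.extend(sorted(attr_fields))
--     ordered.extend(sorted(other_fields))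
--
--     return ordered
-- ===== SOURCE B (Python) =====
-- from typing import List, Set
--
-- def get_field_order(fields: Set[str]) -> List[str]:
--     """Order fields by one composite-key sort: core fields first (in priority
--     order), then attr_* fields alphabetically, then the rest alphabetically."""
--     core_fields = [
--         'timestamp', 'sessionId', 'metricName', 'value', 'demoContentId',
--         'device', 'deviceCodename', 'language', 'connected', 'banyan',
--         'simplified', 'retailer', 'gitCommitSha', 'gitBranch',
--         'isVegaPlatform', 'userAgent', 'demoExperimentGroup'
--     ]
--     rank = {f: i for i, f in enumerate(core_fields)}
--     n = len(core_fields)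
--
--     def key(f):
--         if f in rank:
--             return (rank[f], '')
--         return (n + (0 if f.startswith('attr_') else 1), f)
--
--     return sorted(fields, key=key)
-- ===== Notes on version B (the rewrite author's own statement) =====
-- stated objective: simpler
-- what changed: Replaced A's three-bucket partition loop plus membership re-scan plus two separate sorts with one sort of the whole set under a composite key (core-priority rank, then attr_ prefix, then name).
import Mathlib
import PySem

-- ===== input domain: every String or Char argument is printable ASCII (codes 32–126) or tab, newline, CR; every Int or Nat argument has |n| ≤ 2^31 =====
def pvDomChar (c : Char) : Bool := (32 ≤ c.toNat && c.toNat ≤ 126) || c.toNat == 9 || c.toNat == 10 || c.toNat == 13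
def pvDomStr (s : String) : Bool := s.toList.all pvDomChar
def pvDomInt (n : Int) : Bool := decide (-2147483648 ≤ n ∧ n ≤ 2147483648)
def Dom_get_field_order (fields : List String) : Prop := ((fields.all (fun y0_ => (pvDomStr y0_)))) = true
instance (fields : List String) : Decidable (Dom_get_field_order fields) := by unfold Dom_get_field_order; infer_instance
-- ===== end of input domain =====

-- B replaces A's three-bucket partition plus two separate sorts with a single
-- composite-key sort (objective: simpler).

-- ===== PORT A =====
def coreFieldsA : List String :=
  ["timestamp", "sessionId", "metricName", "value", "demoContentId",
   "device", "deviceCodename", "language", "connected", "banyan",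
   "simplified", "retailer", "gitCommitSha", "gitBranch",
   "isVegaPlatform", "userAgent", "demoExperimentGroup"]

def get_field_order (fields : List String) : List String :=
  -- for field in fields: partition into attr_fields / other_fields (core skipped)
  let st := fields.foldl
    (fun (st : List String × List String) field =>
      if coreFieldsA.contains field then st
      else if PySem.Str.startswith field "attr_" then (st.1 ++ [field], st.2)
      else (st.1, st.2 ++ [field]))
    ([], [])
  -- for field in core_fields: if field in fields: ordered.append(field)
  let ordered := coreFieldsA.foldl
    (fun acc field => if fields.contains field then acc ++ [field] else acc) []
  ordered ++ PySem.List.sorted st.1 (fun x => x) ++ PySem.List.sorted st.2 (fun x => x)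

-- ===== PORT B =====
def coreFieldsB : List String :=
  ["timestamp", "sessionId", "metricName", "value", "demoContentId",
   "device", "deviceCodename", "language", "connected", "banyan",
   "simplified", "retailer", "gitCommitSha", "gitBranch",
   "isVegaPlatform", "userAgent", "demoExperimentGroup"]

-- rank = {f: i for i, f in enumerate(core_fields)}
def rankB : PySem.Dict String Int :=
  (PySem.List.enumerate coreFieldsB 0).foldl (fun d p => d.insert p.2 p.1) PySem.Dict.empty

-- key(f) = (rank[f], '') if f in rank else (n + (0 if f.startswith('attr_') else 1), f)
def keyB1 (f : String) : Int :=
  match rankB.get? f with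
  | some i => i
  | none => (coreFieldsB.length : Int) + (if PySem.Str.startswith f "attr_" then 0 else 1)

def keyB2 (f : String) : String :=
  if (rankB.get? f).isSome then "" else f

def get_field_order_alt (fields : List String) : List String :=
  PySem.List.sorted2 fields keyB1 keyB2

-- ===== PRECONDITION & SPEC =====
-- Python A's parameter is a set; Pre_ restricts the List representation to the
-- distinct elements a set holds (a list with duplicates does not denote a set;
-- on such lists A keeps each core field once while B keeps every copy).
def Pre_get_field_order (fields : List String) : Prop := fields.Nodup
instance (fields : List String) : Decidable (Pre_get_field_order fields) := by
  unfold Pre_get_field_order; infer_instance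

def pvWitness_get_field_order : List String :=
  ["attr_color", "zeta", "timestamp", "device", "alpha", "attr_size"]

def Spec_get_field_order (fields : List String) (out : List String) : Prop := out = get_field_order_alt fields
instance (fields : List String) (out : List String) : Decidable (Spec_get_field_order fields out) := by unfold Spec_get_field_order; infer_instance

-- ===== CLAIM (what is proved, stated in full; the proofs are below) =====
def Claim_equal_get_field_order : Prop := ∀ (fields : List String), Dom_get_field_order fields → Pre_get_field_order fields → Spec_get_field_order fields (get_field_order fields)

-- ===== LEMMAS AND PROOFS =====

-- B's composite key, as a single lexicographic key
def lexKeyB (f : String) : Int ×ₗ String := toLex (keyB1 f, keyB2 f)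

theorem coreFieldsA_nodup : coreFieldsA.Nodup := by decide

-- get? of the dict built by inserting (value, index) pairs from enumerate over a nodup list
theorem get?_enumerate_fold (l : List String) (hnd : l.Nodup) (s : Int)
    (d : PySem.Dict String Int) (f : String) :
    ((PySem.List.enumerate l s).foldl (fun d p => d.insert p.2 p.1) d).get? f =
      if f ∈ l then some (s + (l.idxOf f : Int)) else d.get? f := by
  induction l generalizing s d with
  | nil => simp [PySem.List.enumerate]
  | cons x t ih =>
    rw [PySem.List.enumerate_cons]
    simp only [List.foldl_cons]
    rw [ih hnd.of_cons (s+1) (d.insert x s)]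
    rcases List.nodup_cons.mp hnd with ⟨hx, _⟩
    by_cases hf : f ∈ t
    · have hne : f ≠ x := fun h => hx (h ▸ hf)
      simp [hf, List.mem_cons, Ne.symm hne]
      ring
    · by_cases hfx : f = x
      · subst hfx
        simp [hf, PySem.Dict.get?_insert_self, List.idxOf_cons_self]
      · simp [hf, hfx, PySem.Dict.get?_insert_of_ne _ _ hfx]

theorem rankB_get? (f : String) :
    rankB.get? f = if f ∈ coreFieldsA then some ((coreFieldsA.idxOf f : Nat) : Int) else none := by
  have h := get?_enumerate_fold coreFieldsA coreFieldsA_nodup 0 PySem.Dict.empty f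
  simpa [rankB, coreFieldsB] using h

theorem keyB1_core {f : String} (h : f ∈ coreFieldsA) :
    keyB1 f = ((coreFieldsA.idxOf f : Nat) : Int) := by
  simp [keyB1, rankB_get?, h]

theorem keyB1_not_core {f : String} (h : f ∉ coreFieldsA) :
    keyB1 f = 17 + (if PySem.Str.startswith f "attr_" then 0 else 1) := by
  simp [keyB1, rankB_get?, h]; rfl

theorem keyB2_not_core {f : String} (h : f ∉ coreFieldsA) : keyB2 f = f := by
  simp [keyB2, rankB_get?, h]

-- sorted2 with keys keyB1, keyB2 is sorted with the lexicographic key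
theorem sorted2_eq_sorted_lex (xs : List String) :
    PySem.List.sorted2 xs keyB1 keyB2 = PySem.List.sorted xs lexKeyB false := by
  rw [PySem.List.sorted_eq_foldl_insertBy]
  unfold PySem.List.sorted2
  simp only [if_neg (by decide : ¬ (false = true))]
  have hbe : (fun (a b : String) =>
      decide (keyB1 a < keyB1 b) || !decide (keyB1 b < keyB1 a) && decide (keyB2 a < keyB2 b)) =
      (fun a b => decide (lexKeyB a < lexKeyB b)) := by
    funext a b
    rcases lt_trichotomy (keyB1 a) (keyB1 b) with h | h | h
    · simp [lexKeyB, Prod.Lex.toLex_lt_toLex, h, not_lt.mpr h.le]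
    · simp [lexKeyB, Prod.Lex.toLex_lt_toLex, h]
    · simp [lexKeyB, Prod.Lex.toLex_lt_toLex, not_lt.mpr h.le, h, h.ne']
  rw [hbe]

-- A's partition loop is two filters
def pAttr (coreOf : List String) (f : String) : Bool :=
  !coreOf.contains f && PySem.Str.startswith f "attr_"
def pOther (coreOf : List String) (f : String) : Bool :=
  !coreOf.contains f && !PySem.Str.startswith f "attr_"

theorem partition_loop_eq (fields : List String) :
    fields.foldl
      (fun (st : List String × List String) field =>
        if coreFieldsA.contains field then st
        else if PySem.Str.startswith field "attr_" then (st.1 ++ [field], st.2)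
        else (st.1, st.2 ++ [field]))
      ([], []) =
    (fields.filter (pAttr coreFieldsA), fields.filter (pOther coreFieldsA)) := by
  have hbody : (fun (st : List String × List String) field =>
        if coreFieldsA.contains field then st
        else if PySem.Str.startswith field "attr_" then (st.1 ++ [field], st.2)
        else (st.1, st.2 ++ [field])) =
      (fun st field =>
        (if pAttr coreFieldsA field then st.1 ++ [field] else st.1,
         if pOther coreFieldsA field then st.2 ++ [field] else st.2)) := by
    funext st field
    by_cases h1 : field ∈ coreFieldsA <;>
      by_cases h2 : PySem.Chars.startswith field.toList ['a', 't', 't', 'r', '_'] <;>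
      simp [pAttr, pOther, PySem.Str.startswith, h1, h2]
  rw [hbody, PySem.List.foldl_prod_mk
    (f := fun l x => if pAttr coreFieldsA x then l ++ [x] else l)
    (g := fun l x => if pOther coreFieldsA x then l ++ [x] else l)]
  simp [PySem.List.foldl_append_if]

theorem ordered_loop_eq (fields : List String) :
    coreFieldsA.foldl
      (fun acc field => if fields.contains field then acc ++ [field] else acc) [] =
    coreFieldsA.filter (fields.contains ·) := by
  simpa using PySem.List.foldl_append_if (fun f => fields.contains f) id coreFieldsA []

theorem a_out_perm (fields : List String) (h : fields.Nodup) :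
    (coreFieldsA.filter (fields.contains ·) ++
      (PySem.List.sorted (fields.filter (pAttr coreFieldsA)) (fun x => x) ++
       PySem.List.sorted (fields.filter (pOther coreFieldsA)) (fun x => x))).Perm fields := by
  have hC : (coreFieldsA.filter (fields.contains ·)).Perm
      (fields.filter (fun f => coreFieldsA.contains f)) := by
    rw [List.perm_ext_iff_of_nodup (coreFieldsA_nodup.filter _) (h.filter _)]
    intro a
    simp [List.mem_filter, and_comm]
  have hL1 : fields.filter (pAttr coreFieldsA) =
      (fields.filter (fun f => !coreFieldsA.contains f)).filter
        (fun f => PySem.Str.startswith f "attr_") := by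
    rw [List.filter_filter]
    exact List.filter_congr (fun x _ => by simp [pAttr, Bool.and_comm])
  have hL2 : fields.filter (pOther coreFieldsA) =
      (fields.filter (fun f => !coreFieldsA.contains f)).filter
        (fun f => !PySem.Str.startswith f "attr_") := by
    rw [List.filter_filter]
    exact List.filter_congr (fun x _ => by simp [pOther, Bool.and_comm])
  refine List.Perm.trans
    (List.Perm.append hC
      ((PySem.List.sorted_perm _ _ _).append (PySem.List.sorted_perm _ _ _))) ?_
  refine List.Perm.trans (List.Perm.append_left _ ?_) (List.filter_append_perm _ _)
  rw [hL1, hL2]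
  exact List.filter_append_perm _ _

-- closed facts about the core-field ranks
theorem core_pairwise_idx :
    coreFieldsA.Pairwise (fun a b => coreFieldsA.idxOf a < coreFieldsA.idxOf b) := by decide

theorem core_idx_lt (f : String) (h : f ∈ coreFieldsA) : coreFieldsA.idxOf f < 17 := by
  fin_cases h <;> decide

theorem a_out_pairwise (fields : List String) (h : fields.Nodup) :
    (coreFieldsA.filter (fields.contains ·) ++
      (PySem.List.sorted (fields.filter (pAttr coreFieldsA)) (fun x => x) ++
       PySem.List.sorted (fields.filter (pOther coreFieldsA)) (fun x => x))).Pairwise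
      (fun a b => lexKeyB a < lexKeyB b) := by
  -- keys on each bucket
  have hkC : ∀ f ∈ coreFieldsA.filter (fields.contains ·),
      keyB1 f = ((coreFieldsA.idxOf f : Nat) : Int) ∧ keyB1 f < 17 := by
    intro f hf
    have hm := (List.mem_filter.mp hf).1
    refine ⟨keyB1_core hm, ?_⟩
    rw [keyB1_core hm]
    exact_mod_cast core_idx_lt f hm
  have hk1 : ∀ f ∈ PySem.List.sorted (fields.filter (pAttr coreFieldsA)) (fun x => x),
      keyB1 f = 17 ∧ keyB2 f = f := by
    intro f hf
    have hm := (List.mem_filter.mp ((PySem.List.mem_sorted _ _ _ _).mp hf)).2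
    have hnc : f ∉ coreFieldsA := by
      intro hc
      simp [pAttr, hc] at hm
    have hat : PySem.Str.startswith f "attr_" = true := by
      simp [pAttr] at hm; exact hm.2
    exact ⟨by rw [keyB1_not_core hnc, hat]; simp, keyB2_not_core hnc⟩
  have hk2 : ∀ f ∈ PySem.List.sorted (fields.filter (pOther coreFieldsA)) (fun x => x),
      keyB1 f = 18 ∧ keyB2 f = f := by
    intro f hf
    have hm := (List.mem_filter.mp ((PySem.List.mem_sorted _ _ _ _).mp hf)).2
    have hnc : f ∉ coreFieldsA := by
      intro hc
      simp [pOther, hc] at hm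
    have hat : PySem.Str.startswith f "attr_" = false := by
      simp [pOther] at hm; exact hm.2
    exact ⟨by rw [keyB1_not_core hnc, hat]; simp, keyB2_not_core hnc⟩
  -- strict string order inside each sorted bucket
  have hstrict : ∀ l : List String, l.Nodup →
      (PySem.List.sorted l (fun x => x)).Pairwise (fun a b => a < b) := by
    intro l hl
    have hle := PySem.List.sorted_pairwise l (fun x => x)
    have hnd : (PySem.List.sorted l (fun x => x)).Nodup :=
      (PySem.List.sorted_perm l (fun x => x) false).nodup_iff.mpr hl
    exact (hle.and hnd).imp (fun hab => lt_of_le_of_ne hab.1 hab.2)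
  -- pairwise inside the core bucket
  have hCpair : (coreFieldsA.filter (fields.contains ·)).Pairwise
      (fun a b => lexKeyB a < lexKeyB b) := by
    refine List.Pairwise.sublist List.filter_sublist
      (core_pairwise_idx.imp_of_mem (S := fun a b => lexKeyB a < lexKeyB b) ?_)
    intro a b ha hb hr
    rw [lexKeyB, lexKeyB, Prod.Lex.toLex_lt_toLex]
    exact Or.inl (by simpa [keyB1_core ha, keyB1_core hb] using Int.ofNat_lt.mpr hr)
  rw [List.pairwise_append]
  refine ⟨hCpair, ?_, ?_⟩
  · rw [List.pairwise_append]
    refine ⟨?_, ?_, ?_⟩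
    · exact (hstrict _ (h.filter _)).imp_of_mem (fun {a b} ha hb hab => by
        rw [lexKeyB, lexKeyB, Prod.Lex.toLex_lt_toLex]
        exact Or.inr ⟨by simp [(hk1 a ha).1, (hk1 b hb).1], by
          simpa [(hk1 a ha).2, (hk1 b hb).2] using hab⟩)
    · exact (hstrict _ (h.filter _)).imp_of_mem (fun {a b} ha hb hab => by
        rw [lexKeyB, lexKeyB, Prod.Lex.toLex_lt_toLex]
        exact Or.inr ⟨by simp [(hk2 a ha).1, (hk2 b hb).1], by
          simpa [(hk2 a ha).2, (hk2 b hb).2] using hab⟩)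
    · intro a ha b hb
      rw [lexKeyB, lexKeyB, Prod.Lex.toLex_lt_toLex]
      exact Or.inl (by simp [(hk1 a ha).1, (hk2 b hb).1])
  · intro a ha b hb
    rw [lexKeyB, lexKeyB, Prod.Lex.toLex_lt_toLex]
    refine Or.inl ?_
    rcases List.mem_append.mp hb with hb1 | hb2
    · simp only [(hk1 b hb1).1]
      exact lt_of_lt_of_le (hkC a ha).2 (by norm_num)
    · simp only [(hk2 b hb2).1]
      exact lt_of_lt_of_le (hkC a ha).2 (by norm_num)

-- ===== VERDICT (by name: the statement is the Claim_ definition above) =====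
theorem get_field_order_spec : Claim_equal_get_field_order := by
  intro fields _ hpre
  unfold Spec_get_field_order get_field_order_alt
  rw [sorted2_eq_sorted_lex]
  simp only [get_field_order]
  rw [partition_loop_eq, ordered_loop_eq, List.append_assoc]
  exact (PySem.List.sorted_eq_of_perm_of_pairwise_lt _ _ _ (a_out_perm fields hpre)
    (a_out_pairwise fields hpre)).symm
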